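-- pv_equiv track=rewrite | github.com/TC-Wheel/Classic-Author-AI | src/main.py | markov_analyse
-- ===== SOURCE A (Python) =====
-- def markov_analyse(file_list):
--     """
--     in: takes a list
--     out: a markov dictionary
--     """
--     markov_dict = {}
--
--     for line in file_list:
--         words = line.split(" ")
--         for i in range(len(words) - 1):
--             word = words[i]
--             if word not in markov_dict:
--                 markov_dict[word] = [words[i + 1]]
--                 continue
--             value_list = markov_dict[word]
--             if words[i + 1] not in value_list:
--                 value_list.append(words[i + 1])
--     return markov_dict
-- ===== SOURCE B (Python) =====
-- def _succs(pairs, key):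
--     # distinct successors of `key`, in order of first appearance in the pair stream
--     out = []
--     for w, n in pairs:
--         if w == key and n not in out:
--             out.append(n)
--     return out
--
--
-- def markov_analyse(file_list):
--     # Phase 1: flatten all lines into one stream of adjacent word pairs.
--     pairs = []
--     for line in file_list:
--         words = line.split(" ")
--         pairs += list(zip(words, words[1:]))
--     # Phase 2: the distinct first-components, in first-appearance order, are the keys.
--     keys = list(dict.fromkeys(w for w, _ in pairs))
--     # Phase 3: one scan of the whole pair stream per key (loop inversion: keys outer, pairs inner).
--     return {key: _succs(pairs, key) for key in keys}
-- ===== Notes on version B (the rewrite author's own statement) =====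
-- stated objective: alternative
-- what changed: Replaced A's single pass that updates a dict of distinct-successor lists in place by a loop inversion in three completed phases: flatten all lines into one adjacent-pair stream, take the deduped first components (dict.fromkeys) as the keys, then build each entry by scanning the whole pair stream once per key.
import Mathlib
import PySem

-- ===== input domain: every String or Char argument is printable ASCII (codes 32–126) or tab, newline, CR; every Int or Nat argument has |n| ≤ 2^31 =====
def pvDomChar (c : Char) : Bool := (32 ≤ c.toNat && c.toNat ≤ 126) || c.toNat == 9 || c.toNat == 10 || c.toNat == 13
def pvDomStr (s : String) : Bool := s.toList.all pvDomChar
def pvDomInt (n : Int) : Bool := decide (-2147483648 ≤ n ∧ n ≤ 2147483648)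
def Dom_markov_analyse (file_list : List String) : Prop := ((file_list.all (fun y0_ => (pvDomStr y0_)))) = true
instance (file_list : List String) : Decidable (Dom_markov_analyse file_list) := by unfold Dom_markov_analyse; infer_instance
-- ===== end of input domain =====

-- B inverts A's loop structure: it flattens everything into one pair stream, takes the deduped
-- first-components as keys, and then scans the whole stream once per key; same value everywhere.

-- ===== PORT A =====
-- A: one nested loop — for each line, index i over range(len(words)-1), updating the dict in place.
def markov_analyse (file_list : List String) : List (String × List String) :=
  (file_list.foldl (fun md line =>
      let words := (PySem.Str.split? line " ").getD []
      (PySem.List.pyRange 0 ((words.length : Int) - 1) 1).foldl (fun md i =>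
        let word := PySem.List.pyGetD words i ""
        let nxt := PySem.List.pyGetD words (i + 1) ""
        if !(md.contains word) then md.insert word [nxt]
        else
          let value_list := md.getD word []
          if value_list.contains nxt then md
          else md.insert word (value_list ++ [nxt])) md)
    PySem.Dict.empty).items

-- ===== PORT B =====
-- B helper _succs: distinct successors of `key` in the pair stream, in first-appearance order.
def pvSuccs (pairs : List (String × String)) (key : String) : List String :=
  pairs.foldl (fun out p =>
    if p.1 == key && !(out.contains p.2) then out ++ [p.2] else out) []

-- B: phase 1 flattens lines into one pair stream; phase 2 keys = dict.fromkeys of the firsts;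
-- phase 3 a dict comprehension scanning the whole stream once per key.
def markov_analyse_alt (file_list : List String) : List (String × List String) :=
  let pairs := file_list.foldl (fun acc line =>
      let words := (PySem.Str.split? line " ").getD []
      acc ++ words.zip words.tail) []
  let keys := PySem.List.dedup (pairs.map Prod.fst)
  (keys.foldl (fun d key => d.insert key (pvSuccs pairs key)) PySem.Dict.empty).items

-- ===== PRECONDITION & SPEC =====
def Spec_markov_analyse (file_list : List String) (out : List (String × List String)) : Prop := out = markov_analyse_alt file_list
instance (file_list : List String) (out : List (String × List String)) : Decidable (Spec_markov_analyse file_list out) := by unfold Spec_markov_analyse; infer_instance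

-- ===== CLAIM (what is proved, stated in full; the proofs are below) =====
def Claim_equal_markov_analyse : Prop := ∀ (file_list : List String), Dom_markov_analyse file_list → Spec_markov_analyse file_list (markov_analyse file_list)

-- ===== LEMMAS AND PROOFS =====

-- A's per-pair dict update, named for the proofs
def pvStepA (md : PySem.Dict String (List String)) (p : String × String) :
    PySem.Dict String (List String) :=
  if !(md.contains p.1) then md.insert p.1 [p.2]
  else
    if (md.getD p.1 []).contains p.2 then md
    else md.insert p.1 (md.getD p.1 [] ++ [p.2])

-- the pair of words A reads at index i of its inner loop, over all i, is exactly zip words words.tail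
theorem pv_pair_map (ws : List String) :
    (PySem.List.pyRange 0 ((ws.length : Int) - 1) 1).map
      (fun i => (PySem.List.pyGetD ws i "", PySem.List.pyGetD ws (i + 1) "")) = ws.zip ws.tail := by
  apply List.ext_getElem
  · simp only [List.length_map, PySem.List.length_pyRange_one, List.length_zip, List.length_tail]
    omega
  · intro k h1 h2
    have hk : k + 1 < ws.length := by
      simp only [List.length_map, PySem.List.length_pyRange_one] at h1; omega
    simp only [List.getElem_map, PySem.List.getElem_pyRange_one, List.getElem_zip, zero_add,
      Prod.mk.injEq]
    constructor
    · rw [PySem.List.pyGetD_eq_getElem ws "" (by omega) (by omega)]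
      simp
    · rw [PySem.List.pyGetD_eq_getElem ws "" (by omega) (by omega), List.getElem_tail]
      congr 1

-- A's whole nested loop is the fold of pvStepA over the flattened pair stream
-- the flattened pair stream both programs are about
def pvPairs (file_list : List String) : List (String × String) :=
  file_list.flatMap (fun line =>
    let ws := (PySem.Str.split? line " ").getD []
    ws.zip ws.tail)

-- A's whole nested loop is the fold of pvStepA over the flattened pair stream
-- A's nested loop, from any start dict, is the fold of pvStepA over the flattened pair stream
theorem pv_A_gen (file_list : List String) (d : PySem.Dict String (List String)) :
    file_list.foldl (fun md line =>
      let words := (PySem.Str.split? line " ").getD []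
      (PySem.List.pyRange 0 ((words.length : Int) - 1) 1).foldl (fun md i =>
        let word := PySem.List.pyGetD words i ""
        let nxt := PySem.List.pyGetD words (i + 1) ""
        if !(md.contains word) then md.insert word [nxt]
        else
          let value_list := md.getD word []
          if value_list.contains nxt then md
          else md.insert word (value_list ++ [nxt])) md) d
    = (pvPairs file_list).foldl pvStepA d := by
  induction file_list generalizing d with
  | nil => rfl
  | cons line rest ih =>
      simp only [pvPairs, List.flatMap_cons, List.foldl_append, List.foldl_cons]
      rw [ih]
      simp only [pvPairs]
      congr 1
      rw [← pv_pair_map ((PySem.Str.split? line " ").getD []), List.foldl_map]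
      rfl

-- A's whole nested loop is the fold of pvStepA over the flattened pair stream
theorem pv_A_as_pairs (file_list : List String) :
    markov_analyse file_list = ((pvPairs file_list).foldl pvStepA PySem.Dict.empty).items := by
  unfold markov_analyse
  rw [pv_A_gen]

-- one more pair appended to the stream: how pvSuccs changes
theorem pv_succs_append (pairs : List (String × String)) (p : String × String) (k : String) :
    pvSuccs (pairs ++ [p]) k =
      (if p.1 == k && !((pvSuccs pairs k).contains p.2)
       then pvSuccs pairs k ++ [p.2] else pvSuccs pairs k) := by
  unfold pvSuccs
  rw [List.foldl_append]
  rfl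

-- a key that never occurs as a first component has no successors
theorem pv_succs_nil (pairs : List (String × String)) (k : String)
    (h : k ∉ pairs.map Prod.fst) : pvSuccs pairs k = [] := by
  induction pairs with
  | nil => rfl
  | cons q t ih =>
      simp only [List.map_cons, List.mem_cons, not_or] at h
      unfold pvSuccs
      simp only [List.foldl_cons]
      have hq : (q.1 == k) = false := by simp [Ne.symm h.1]
      rw [hq]
      simpa [pvSuccs] using ih h.2

-- MAIN INVARIANT: A's dict after consuming a pair stream is exactly B's keyed table of that stream
theorem pv_main (pairs : List (String × String)) :
    (pairs.foldl pvStepA PySem.Dict.empty).items =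
      (PySem.List.dedup (pairs.map Prod.fst)).map (fun k => (k, pvSuccs pairs k)) := by
  induction pairs using List.reverseRecOn with
  | nil => rfl
  | append_singleton pairs p ih =>
      set d := pairs.foldl pvStepA PySem.Dict.empty with hd
      set keys := PySem.List.dedup (pairs.map Prod.fst) with hkeys
      have hnd : keys.Nodup := by
        rw [hkeys]
        simp only [PySem.List.dedup_eq_ofList]
        exact PySem.Set.nodup_ofList _
      have hdkeys : d.keys = keys := by
        show d.items.map Prod.fst = keys
        rw [ih, List.map_map]
        simp [Function.comp_def]
      have hkeys' : PySem.List.dedup ((pairs ++ [p]).map Prod.fst) = PySem.Set.add keys p.1 := by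
        rw [hkeys]
        simp only [List.map_append, List.map_cons, List.map_nil, PySem.List.dedup_eq_ofList]
        exact PySem.Set.ofList_append_singleton _ _
      rw [List.foldl_append, List.foldl_cons, List.foldl_nil, ← hd, hkeys']
      by_cases hmem : p.1 ∈ keys
      · have hcont : d.contains p.1 = true := by
          rw [PySem.Dict.contains_iff_mem_keys, hdkeys]; exact hmem
        have hitem : (p.1, pvSuccs pairs p.1) ∈ d.items := by
          rw [ih]; exact List.mem_map_of_mem hmem
        have hget : d.getD p.1 [] = pvSuccs pairs p.1 :=
          PySem.Dict.getD_of_mem_items d hitem (by rw [hdkeys]; exact hnd) []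
        rw [PySem.Set.add_of_mem hmem]
        unfold pvStepA
        rw [hcont, hget]
        simp only [Bool.not_true, Bool.false_eq_true, if_false]
        by_cases hc : (pvSuccs pairs p.1).contains p.2
        · have hc' : p.2 ∈ pvSuccs pairs p.1 := by simpa using hc
          rw [if_pos hc, ih]
          apply (List.map_congr_left _).symm
          intro k hk
          rw [pv_succs_append]
          by_cases hkp : p.1 = k
          · subst hkp; simp [hc']
          · simp [hkp]
        · have hc' : p.2 ∉ pvSuccs pairs p.1 := by simpa using hc
          rw [if_neg hc, PySem.Dict.items_insert_of_contains d _ hcont, ih, List.map_map]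
          apply List.map_congr_left
          intro k hk
          rw [pv_succs_append]
          by_cases hkp : p.1 = k
          · subst hkp
            simp [hc']
          · simp [hkp, Ne.symm hkp]
      · have hcont : d.contains p.1 = false := by
          rw [← Bool.not_eq_true, PySem.Dict.contains_iff_mem_keys, hdkeys]; exact hmem
        have hsnil : pvSuccs pairs p.1 = [] := by
          apply pv_succs_nil
          intro hin
          exact hmem (by rw [hkeys]; simpa [PySem.List.dedup_eq_ofList, PySem.Set.mem_ofList]
            using hin)
        rw [PySem.Set.add_of_not_mem hmem]
        unfold pvStepA
        rw [hcont]
        simp only [Bool.not_false, if_true]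
        rw [PySem.Dict.items_insert_of_not_contains d _ hcont, ih, List.map_append]
        congr 1
        · apply List.map_congr_left
          intro k hk
          rw [pv_succs_append]
          have : p.1 ≠ k := fun h => hmem (h ▸ hk)
          simp [this]
        · simp only [List.map_cons, List.map_nil]
          rw [pv_succs_append, hsnil]
          simp

-- B's phase 2+3 table over any pair stream lays out its items list
theorem pv_table (pairs : List (String × String)) :
    ((PySem.List.dedup (pairs.map Prod.fst)).foldl
        (fun d key => d.insert key (pvSuccs pairs key)) PySem.Dict.empty).items
      = (PySem.List.dedup (pairs.map Prod.fst)).map (fun k => (k, pvSuccs pairs k)) := by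
  rw [PySem.Dict.items_foldl_insert_fresh _ (fun a => a) (fun key => pvSuccs pairs key)
    PySem.Dict.empty (fun a _ => PySem.Dict.contains_empty _)
    (by simp [PySem.List.dedup_eq_ofList, PySem.Set.nodup_ofList])]
  simp [show (PySem.Dict.empty : PySem.Dict String (List String)).items = [] from rfl]

-- B's three phases compute exactly the keyed table of the flattened pair stream
theorem pv_B_eq (file_list : List String) :
    markov_analyse_alt file_list =
      (PySem.List.dedup ((pvPairs file_list).map Prod.fst)).map
        (fun k => (k, pvSuccs (pvPairs file_list) k)) := by
  have hpairs : (file_list.foldl (fun acc line =>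
      let words := (PySem.Str.split? line " ").getD []
      acc ++ words.zip words.tail) []) = pvPairs file_list := by
    rw [PySem.List.foldl_append_eq_flatMap]
    rfl
  rw [show markov_analyse_alt file_list =
      ((PySem.List.dedup ((file_list.foldl (fun acc line =>
          let words := (PySem.Str.split? line " ").getD []
          acc ++ words.zip words.tail) []).map Prod.fst)).foldl
        (fun d key => d.insert key (pvSuccs (file_list.foldl (fun acc line =>
          let words := (PySem.Str.split? line " ").getD []
          acc ++ words.zip words.tail) []) key)) PySem.Dict.empty).items from rfl,
    hpairs, pv_table]

-- ===== VERDICT (by name: the statement is the Claim_ definition above) =====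
theorem markov_analyse_spec : Claim_equal_markov_analyse := by
  intro file_list _
  unfold Spec_markov_analyse
  rw [pv_A_as_pairs, pv_main, pv_B_eq]
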